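-- pv_equiv track=rewrite | github.com/Pavlos-96/Parsing_Project | 5_1.py | first_sets
-- ===== SOURCE A (Python) =====
-- import copy
--
-- def first_sets(grammar):
--     first = dict()
--     first_updated = first.copy()
--     for non_terminal in grammar:
--         first.setdefault(non_terminal, set())
--     while first != first_updated:
--         first_updated = copy.deepcopy(first)
--         for non_terminal in grammar:
--             for production in grammar[non_terminal]:
--                 if production[-1] in first:
--                     first[non_terminal].update(first[production[-1]])
--                 else:
--                     first[non_terminal].add(production[-1])
--     return first
-- ===== SOURCE B (Python) =====
-- def first_sets(grammar):
--     def reachable(x):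
--         seen, stack = set(), [x]
--         while stack:
--             y = stack.pop()
--             if y not in seen:
--                 seen.add(y)
--                 stack.extend(p[-1] for p in grammar[y] if p[-1] in grammar)
--         return seen
--     return {x: {p[-1] for y in reachable(x) for p in grammar[y] if p[-1] not in grammar}
--             for x in grammar}
-- ===== Notes on version B (the rewrite author's own statement) =====
-- stated objective: alternative
-- what changed: B replaces A's global fixed-point relaxation (repeated full passes with a deepcopy and whole-dict comparison per pass) by per-nonterminal graph reachability: an explicit-stack DFS over the last-symbol dependency edges, then one union of the terminal last-symbols of the reached nonterminals; no iteration until convergence, no copies.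
import Mathlib
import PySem

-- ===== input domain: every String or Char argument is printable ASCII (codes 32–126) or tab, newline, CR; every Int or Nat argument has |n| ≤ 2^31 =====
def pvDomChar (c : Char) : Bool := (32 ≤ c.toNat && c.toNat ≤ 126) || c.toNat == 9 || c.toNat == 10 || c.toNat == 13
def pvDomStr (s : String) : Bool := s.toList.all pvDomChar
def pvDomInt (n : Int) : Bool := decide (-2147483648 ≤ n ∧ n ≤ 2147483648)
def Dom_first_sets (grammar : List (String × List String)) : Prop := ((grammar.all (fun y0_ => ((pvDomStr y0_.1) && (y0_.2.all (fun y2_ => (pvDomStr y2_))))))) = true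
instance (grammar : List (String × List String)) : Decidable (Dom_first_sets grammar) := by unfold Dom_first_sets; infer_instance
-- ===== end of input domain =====

-- B replaces A's global fixed-point relaxation (deepcopy + full-dict comparison per pass) by a
-- per-nonterminal explicit-stack DFS over the last-symbol dependency edges followed by one union of
-- terminal symbols; objective: alternative algorithm. Neither version mutates its argument.
-- Python returns dict[str, set[str]]; a Python set has no observable order, so BOTH ports return each
-- set in sorted order (pvCanon) as its canonical list representative; the dict keeps insertion order.

-- ===== PORT A =====
-- production[-1] as a 1-character string (none = IndexError on an empty production, excluded by Pre_)
def pvLastA (p : String) : Option String :=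
  (PySem.Str.pyGet? p (-1)).map (fun c => String.ofList [c])

-- one body of A's while loop: 'for non_terminal in grammar: for production in grammar[...]: ...';
-- 'first[nt].update(S)' / 'first[nt].add(a)' rendered as insert of the updated set (nt is always a key)
def pvPassA (g : PySem.Dict String (List String)) (f : PySem.Dict String (PySem.Set String)) :
    PySem.Dict String (PySem.Set String) :=
  g.keys.foldl (fun f nt =>
    (g.getD nt []).foldl (fun f production =>
      match pvLastA production with
      | none => f
      | some a =>
        if f.contains a then
          f.insert nt (PySem.Set.update (f.getD nt []) (f.getD a []))
        else
          f.insert nt (PySem.Set.add (f.getD nt []) a)) f) f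

-- A's unbounded while loop, with fuel: size*P+2 passes provably suffice (each non-final pass grows the
-- total content by at least one element, and the total content is bounded by size*P).
-- 'first != first_updated' is ported as structural equality: prev is a snapshot of f and a pass only
-- appends to the value sets in place, so Python's content comparison coincides with it here.
def pvLoopA (g : PySem.Dict String (List String)) :
    Nat → PySem.Dict String (PySem.Set String) → PySem.Dict String (PySem.Set String) →
    PySem.Dict String (PySem.Set String)
  | 0, f, _ => f
  | n + 1, f, prev => if f = prev then f else pvLoopA g n (pvPassA g f) f

-- canonical list representative of an (unordered) Python set of strings: its sorted elements
def pvCanon (v : List String) : List String := PySem.List.sorted v (fun t => t) false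

def first_sets (grammar : List (String × List String)) : List (String × List String) :=
  let g := PySem.Dict.ofList grammar
  -- first and first_updated both start empty; the setdefault loop seeds one empty set per key
  let first := g.keys.foldl (fun d k => d.setdefault k PySem.Set.empty) PySem.Dict.empty
  (pvLoopA g (g.size * (g.values.map List.length).sum + 2) first PySem.Dict.empty).items.map
    (fun p => (p.1, pvCanon p.2))

-- ===== PORT B =====
def pvLastB (p : String) : Option String :=
  (PySem.Str.pyGet? p (-1)).map (fun c => String.ofList [c])

-- 'p[-1] for p in grammar[y] if p[-1] in grammar' (the dependency successors of y)
def pvSuccsB (g : PySem.Dict String (List String)) (y : String) : List String :=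
  (g.getD y []).filterMap (fun p =>
    match pvLastB p with
    | some a => if g.contains a then some a else none
    | none => none)

-- 'p[-1] for p in grammar[y] if p[-1] not in grammar' (the terminal last symbols of y)
def pvTermsB (g : PySem.Dict String (List String)) (y : String) : List String :=
  (g.getD y []).filterMap (fun p =>
    match pvLastB p with
    | some a => if g.contains a then none else some a
    | none => none)

-- B's 'reachable': explicit-stack DFS; the head of the list is the top of the stack (Python pops from
-- the end; the visit order only affects the unmodelled iteration order of the 'seen' set).
-- Fuel: 1 + (total number of productions) iterations provably suffice.
def pvDfsB (g : PySem.Dict String (List String)) :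
    Nat → List String → PySem.Set String → PySem.Set String
  | _, [], seen => seen
  | 0, _ :: _, seen => seen
  | n + 1, y :: rest, seen =>
    if PySem.Set.contains seen y then pvDfsB g n rest seen
    else pvDfsB g n (pvSuccsB g y ++ rest) (PySem.Set.add seen y)

def first_sets_alt (grammar : List (String × List String)) : List (String × List String) :=
  let g := PySem.Dict.ofList grammar
  let fuel := 1 + (g.values.map List.length).sum
  -- {x: {p[-1] for y in reachable(x) for p in grammar[y] if p[-1] not in grammar} for x in grammar}
  (g.keys.foldl (fun d x =>
      d.insert x ((pvDfsB g fuel [x] PySem.Set.empty).foldl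
        (fun s y => PySem.Set.update s (pvTermsB g y)) PySem.Set.empty))
    PySem.Dict.empty).items.map (fun p => (p.1, pvCanon p.2))

-- ===== PRECONDITION & SPEC =====
-- Pre_ excludes grammars with an empty production string among the dict's values: there Python A
-- raises IndexError on production[-1] (and B raises in the same place); the ports themselves are
-- total and agree even there, so the proofs below do not need to consume Pre_.
def Pre_first_sets (grammar : List (String × List String)) : Prop :=
  ∀ v ∈ (PySem.Dict.ofList grammar).values, ∀ p ∈ v, p ≠ ""
instance (grammar : List (String × List String)) : Decidable (Pre_first_sets grammar) := by
  unfold Pre_first_sets; infer_instance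

def pvWitness_first_sets : (List (String × List String)) :=
  [("S", ["aA", "b"]), ("A", ["S", "c"])]

def Spec_first_sets (grammar : List (String × List String)) (out : List (String × List String)) : Prop := out = first_sets_alt grammar
instance (grammar : List (String × List String)) (out : List (String × List String)) : Decidable (Spec_first_sets grammar out) := by unfold Spec_first_sets; infer_instance

-- ===== CLAIM (what is proved, stated in full; the proofs are below) =====
def Claim_equal_first_sets : Prop := ∀ (grammar : List (String × List String)), Dom_first_sets grammar → Pre_first_sets grammar → Spec_first_sets grammar (first_sets grammar)

-- ===== LEMMAS AND PROOFS =====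

-- dependency edge, reachability, terminal-justification (shared characterization of both results)
def pvEdge (g : PySem.Dict String (List String)) (x a : String) : Prop := a ∈ pvSuccsB g x
def pvReach (g : PySem.Dict String (List String)) : String → String → Prop :=
  Relation.ReflTransGen (pvEdge g)
def pvSound (g : PySem.Dict String (List String)) (x t : String) : Prop :=
  ∃ y, pvReach g x y ∧ t ∈ pvTermsB g y

-- all last symbols of all productions (the universe every first-set lives in)
def pvAllLasts (g : PySem.Dict String (List String)) : List String :=
  g.keys.flatMap (fun x => (g.getD x []).filterMap pvLastA)

-- invariant of A's state dict
def pvGood (g : PySem.Dict String (List String)) (f : PySem.Dict String (PySem.Set String)) : Prop :=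
  f.keys = g.keys ∧
  ∀ x, (f.getD x []).Nodup ∧ ∀ t ∈ f.getD x [], t ∈ pvAllLasts g ∧ pvSound g x t

def pvSize (g : PySem.Dict String (List String)) (f : PySem.Dict String (PySem.Set String)) : Nat :=
  (g.keys.map (fun x => (f.getD x []).length)).sum

-- per-production contribution (functional form of A's inner branch)
def pvContribB (f : PySem.Dict String (PySem.Set String)) (p : String) : PySem.Set String :=
  match pvLastB p with
  | none => PySem.Set.empty
  | some a => if f.contains a then f.getD a [] else PySem.Set.ofList [a]

-- functional per-key form of one pass of A (Gauss-Seidel order preserved)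
def pvStepB (g : PySem.Dict String (List String)) (f : PySem.Dict String (PySem.Set String)) :
    PySem.Dict String (PySem.Set String) :=
  g.keys.foldl (fun f x =>
    f.insert x ((g.getD x []).foldl (fun s p => PySem.Set.update s (pvContribB f p)) (f.getD x []))) f

theorem pvLast_eq (p : String) : pvLastB p = pvLastA p := rfl

theorem pv_update_of_subset {s : PySem.Set String} {t : List String}
    (h : ∀ y ∈ t, y ∈ s) : PySem.Set.update s t = s := by
  rw [PySem.Set.update_eq_append_filter]
  have hnil : List.filter (fun y => !s.contains y) (PySem.Set.ofList t) = [] := by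
    apply List.filter_eq_nil_iff.mpr
    intro a ha
    have ha' : a ∈ s := h a ((PySem.Set.mem_ofList t a).mp ha)
    simpa using ha'
  rw [hnil, List.append_nil]

theorem pv_insert_getD_self (d : PySem.Dict String (PySem.Set String)) (x : String)
    (hc : d.contains x = true) (hnd : d.keys.Nodup) :
    d.insert x (d.getD x []) = d := by
  apply PySem.Dict.ext
  rw [PySem.Dict.items_insert_of_contains d _ hc]
  conv_rhs => rw [← List.map_id d.items]
  apply List.map_congr_left
  intro p hp
  by_cases h : (p.1 == x) = true
  · have hx : p.1 = x := by simpa using h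
    have h2 : d.get? p.1 = some p.2 := PySem.Dict.get?_of_mem_items d (by simpa using hp) hnd
    have h4 : d.getD p.1 [] = p.2 := PySem.Dict.getD_of_get?_eq_some d [] h2
    simp [← hx, h4]
  · simp [h]

theorem pv_inner_eq (ps : List String) (f : PySem.Dict String (PySem.Set String)) (x : String)
    (hx : f.contains x = true) :
    ∀ s : PySem.Set String, (∀ y ∈ f.getD x [], y ∈ s) →
    ps.foldl (fun f production =>
      match pvLastA production with
      | none => f
      | some a =>
        if f.contains a then
          f.insert x (PySem.Set.update (f.getD x []) (f.getD a []))
        else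
          f.insert x (PySem.Set.add (f.getD x []) a)) (f.insert x s)
    = f.insert x (ps.foldl (fun s p => PySem.Set.update s (pvContribB f p)) s) := by
  induction ps with
  | nil => intro s hs; rfl
  | cons p ps ih =>
    intro s hs
    simp only [List.foldl_cons]
    cases hl : pvLastA p with
    | none =>
      have hcb : pvContribB f p = PySem.Set.empty := by
        simp [pvContribB, pvLast_eq, hl]
      rw [hcb]
      rw [show PySem.Set.update s PySem.Set.empty = s from PySem.Set.update_nil s]
      exact ih s hs
    | some a =>
      dsimp only
      by_cases hax : a = x
      · subst hax
        have hca : (f.insert a s).contains a = true := PySem.Dict.contains_insert_self f a s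
        rw [if_pos hca, PySem.Dict.getD_insert_self, PySem.Dict.insert_insert_self]
        have hss : PySem.Set.update s s = s := pv_update_of_subset (fun y hy => hy)
        rw [hss]
        have hcb : pvContribB f p = f.getD a [] := by
          simp [pvContribB, pvLast_eq, hl, hx]
        rw [hcb, pv_update_of_subset hs]
        exact ih s hs
      · have hbe : (a == x) = false := by simp [hax]
        rw [PySem.Dict.contains_insert, hbe, Bool.false_or]
        by_cases hfa : f.contains a = true
        · rw [if_pos hfa, PySem.Dict.getD_insert_self,
            PySem.Dict.getD_insert_of_ne f s [] hax, PySem.Dict.insert_insert_self]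
          have hcb : pvContribB f p = f.getD a [] := by
            simp [pvContribB, pvLast_eq, hl, hfa]
          rw [hcb]
          exact ih (PySem.Set.update s (f.getD a [])) (fun y hy =>
            (PySem.Set.mem_update s (f.getD a []) y).mpr (Or.inl (hs y hy)))
        · rw [if_neg hfa, PySem.Dict.getD_insert_self, PySem.Dict.insert_insert_self]
          have hcb : pvContribB f p = PySem.Set.ofList [a] := by
            simp [pvContribB, pvLast_eq, hl, hfa]
          have hup : PySem.Set.update s (PySem.Set.ofList [a]) = PySem.Set.add s a := by
            have h1 : PySem.Set.ofList [a] = [a] :=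
              PySem.Set.ofList_eq_self_of_nodup [a] (by simp)
            rw [h1, PySem.Set.update_cons, PySem.Set.update_nil]
          rw [hcb, hup]
          exact ih (PySem.Set.add s a) (fun y hy =>
            (PySem.Set.mem_add s a y).mpr (Or.inl (hs y hy)))

theorem pv_pass_aux (g : PySem.Dict String (List String)) (ks : List String) :
    ∀ f : PySem.Dict String (PySem.Set String),
    (∀ k ∈ ks, f.contains k = true) → f.keys.Nodup →
    ks.foldl (fun f nt =>
      (g.getD nt []).foldl (fun f production =>
        match pvLastA production with
        | none => f
        | some a =>
          if f.contains a then
            f.insert nt (PySem.Set.update (f.getD nt []) (f.getD a []))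
          else
            f.insert nt (PySem.Set.add (f.getD nt []) a)) f) f
    = ks.foldl (fun f x =>
        f.insert x ((g.getD x []).foldl (fun s p => PySem.Set.update s (pvContribB f p))
          (f.getD x []))) f := by
  induction ks with
  | nil => intro f _ _; rfl
  | cons x ks ih =>
    intro f hk hnd
    simp only [List.foldl_cons]
    have hx : f.contains x = true := hk x (List.mem_cons_self)
    have h1 : (g.getD x []).foldl (fun f production =>
        match pvLastA production with
        | none => f
        | some a =>
          if f.contains a then
            f.insert x (PySem.Set.update (f.getD x []) (f.getD a []))
          else
            f.insert x (PySem.Set.add (f.getD x []) a)) f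
        = f.insert x ((g.getD x []).foldl (fun s p => PySem.Set.update s (pvContribB f p))
            (f.getD x [])) := by
      conv_lhs => rw [← pv_insert_getD_self f x hx hnd]
      exact pv_inner_eq (g.getD x []) f x hx (f.getD x []) (fun y hy => hy)
    rw [h1]
    exact ih _ (fun k hkk => by
        rw [PySem.Dict.contains_insert]
        simp [hk k (List.mem_cons_of_mem x hkk)])
      (PySem.Dict.nodup_keys_insert f x _ hnd)

theorem pv_pass_eq (g : PySem.Dict String (List String))
    (f : PySem.Dict String (PySem.Set String))
    (hk : ∀ k ∈ g.keys, f.contains k = true) (hnd : f.keys.Nodup) :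
    pvPassA g f = pvStepB g f :=
  pv_pass_aux g g.keys f hk hnd

-- membership descriptions of the successor / terminal lists
theorem pv_mem_succs (g : PySem.Dict String (List String)) (x a : String) :
    a ∈ pvSuccsB g x ↔ ∃ p ∈ g.getD x [], pvLastB p = some a ∧ g.contains a = true := by
  simp only [pvSuccsB, List.mem_filterMap]
  constructor
  · rintro ⟨p, hp, hm⟩
    cases hl : pvLastB p with
    | none => rw [hl] at hm; simp at hm
    | some b =>
      rw [hl] at hm
      by_cases hc : g.contains b = true
      · simp [hc] at hm; exact ⟨p, hp, by rw [hl, hm], hm ▸ hc⟩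
      · simp [Bool.eq_false_iff.mpr hc] at hm
  · rintro ⟨p, hp, hl, hc⟩
    exact ⟨p, hp, by rw [hl]; simp [hc]⟩

theorem pv_mem_terms (g : PySem.Dict String (List String)) (x a : String) :
    a ∈ pvTermsB g x ↔ ∃ p ∈ g.getD x [], pvLastB p = some a ∧ g.contains a = false := by
  simp only [pvTermsB, List.mem_filterMap]
  constructor
  · rintro ⟨p, hp, hm⟩
    cases hl : pvLastB p with
    | none => rw [hl] at hm; simp at hm
    | some b =>
      rw [hl] at hm
      by_cases hc : g.contains b = true
      · simp [hc] at hm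
      · have hc' : g.contains b = false := Bool.eq_false_iff.mpr hc
        simp [hc'] at hm; exact ⟨p, hp, by rw [hl, hm], hm ▸ hc'⟩
  · rintro ⟨p, hp, hl, hc⟩
    exact ⟨p, hp, by rw [hl]; simp [hc]⟩

theorem pv_sound_head {g : PySem.Dict String (List String)} {x a t : String}
    (he : pvEdge g x a) (hs : pvSound g a t) : pvSound g x t := by
  obtain ⟨y, hr, ht⟩ := hs
  exact ⟨y, Relation.ReflTransGen.head he hr, ht⟩

theorem pv_mem_keys_of_prod (g : PySem.Dict String (List String)) {x p : String}
    (hp : p ∈ g.getD x []) : x ∈ g.keys := by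
  by_contra hx
  have hc : g.contains x = false := by
    rw [Bool.eq_false_iff]
    intro h; exact hx ((PySem.Dict.contains_iff_mem_keys g x).mp h)
  rw [PySem.Dict.getD_of_not_contains g [] hc] at hp
  simp at hp

theorem pv_contains_eq {g : PySem.Dict String (List String)}
    {f : PySem.Dict String (PySem.Set String)} (hk : f.keys = g.keys) (a : String) :
    f.contains a = g.contains a := by
  by_cases h : a ∈ g.keys
  · rw [(PySem.Dict.contains_iff_mem_keys f a).mpr (hk ▸ h),
      (PySem.Dict.contains_iff_mem_keys g a).mpr h]
  · rw [Bool.eq_false_iff.mpr (fun hc => h (hk ▸ (PySem.Dict.contains_iff_mem_keys f a).mp hc)),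
      Bool.eq_false_iff.mpr (fun hc => h ((PySem.Dict.contains_iff_mem_keys g a).mp hc))]

theorem pv_mem_allLasts (g : PySem.Dict String (List String)) {x p a : String}
    (hx : x ∈ g.keys) (hp : p ∈ g.getD x []) (hl : pvLastA p = some a) :
    a ∈ pvAllLasts g := by
  simp only [pvAllLasts, List.mem_flatMap]
  exact ⟨x, hx, List.mem_filterMap.mpr ⟨p, hp, hl⟩⟩

-- prefix growth of the inner set-union fold
theorem pv_prefix_update (s : PySem.Set String) (v : List String) :
    s <+: PySem.Set.update s v := by
  rw [PySem.Set.update_eq_append_filter]; exact List.prefix_append s _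

theorem pv_foldl_update_prefix (l : List String) (c : String → PySem.Set String) :
    ∀ s : PySem.Set String, s <+: l.foldl (fun s p => PySem.Set.update s (c p)) s := by
  induction l with
  | nil => intro s; exact List.prefix_refl s
  | cons p l ih =>
    intro s
    simp only [List.foldl_cons]
    calc s <+: PySem.Set.update s (c p) := pv_prefix_update s (c p)
      _ <+: _ := by
        have := ih (PySem.Set.update s (c p))
        simpa using this

theorem pv_mem_foldl_update (l : List String) (c : String → PySem.Set String)
    {p t : String} (hp : p ∈ l) (ht : t ∈ c p) :
    ∀ s : PySem.Set String, t ∈ l.foldl (fun s p => PySem.Set.update s (c p)) s := by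
  induction l with
  | nil => simp at hp
  | cons q l ih =>
    intro s
    simp only [List.foldl_cons]
    rcases List.mem_cons.mp hp with h | h
    · subst h
      exact (pv_foldl_update_prefix l c _).subset
        ((PySem.Set.mem_update s (c p) t).mpr (Or.inr ht))
    · exact ih h _

theorem pv_mem_of_foldl_update (l : List String) (c : String → PySem.Set String) :
    ∀ (s : PySem.Set String) (t : String),
      t ∈ l.foldl (fun s p => PySem.Set.update s (c p)) s → t ∈ s ∨ ∃ p ∈ l, t ∈ c p := by
  induction l with
  | nil => intro s t ht; exact Or.inl ht
  | cons q l ih =>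
    intro s t ht
    simp only [List.foldl_cons] at ht
    rcases ih _ t ht with h | ⟨p, hp, hc⟩
    · rcases (PySem.Set.mem_update s (c q) t).mp h with h | h
      · exact Or.inl h
      · exact Or.inr ⟨q, List.mem_cons_self, h⟩
    · exact Or.inr ⟨p, List.mem_cons_of_mem q hp, hc⟩

theorem pv_nodup_foldl_update (l : List String) (c : String → PySem.Set String) :
    ∀ s : PySem.Set String, s.Nodup → (l.foldl (fun s p => PySem.Set.update s (c p)) s).Nodup := by
  induction l with
  | nil => intro s hs; exact hs
  | cons q l ih =>
    intro s hs
    simp only [List.foldl_cons]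
    exact ih _ (PySem.Set.nodup_update s (c q) hs)

-- pointwise growth order on state dicts
def pvLe (f f' : PySem.Dict String (PySem.Set String)) : Prop :=
  (∀ y, (f.getD y []) <+: (f'.getD y [])) ∧ (∀ y, f.contains y = f'.contains y)

theorem pvLe_refl (f : PySem.Dict String (PySem.Set String)) : pvLe f f :=
  ⟨fun _ => List.prefix_refl _, fun _ => rfl⟩

theorem pvLe_trans {f g h : PySem.Dict String (PySem.Set String)}
    (h1 : pvLe f g) (h2 : pvLe g h) : pvLe f h :=
  ⟨fun y => (h1.1 y).trans (h2.1 y), fun y => (h1.2 y).trans (h2.2 y)⟩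

theorem pv_contrib_mono {f f' : PySem.Dict String (PySem.Set String)} (hle : pvLe f f')
    (p t : String) (ht : t ∈ pvContribB f p) : t ∈ pvContribB f' p := by
  unfold pvContribB at ht ⊢
  cases hl : pvLastB p with
  | none => rw [hl] at ht; simp [PySem.Set.empty] at ht
  | some a =>
    rw [hl] at ht
    dsimp only at ht ⊢
    rw [← hle.2 a]
    by_cases hc : f.contains a = true
    · rw [if_pos hc] at ht ⊢; exact (hle.1 a).subset ht
    · rw [if_neg hc] at ht ⊢; exact ht

-- one insert of the step fold grows the dict
theorem pv_insert_le (f : PySem.Dict String (PySem.Set String)) (x : String)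
    (v : PySem.Set String) (hc : f.contains x = true) (hv : f.getD x [] <+: v) :
    pvLe f (f.insert x v) := by
  constructor
  · intro y
    by_cases hy : y = x
    · subst hy; rw [PySem.Dict.getD_insert_self]; exact hv
    · rw [PySem.Dict.getD_insert_of_ne f v [] hy]
  · intro y
    rw [PySem.Dict.contains_insert]
    by_cases hy : (y == x) = true
    · have : y = x := by simpa using hy
      subst this; simp [hc]
    · simp [Bool.eq_false_iff.mpr (fun h => hy h)]

theorem pv_step_fold_le (g : PySem.Dict String (List String)) :
    ∀ (ks : List String) (f : PySem.Dict String (PySem.Set String)),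
    (∀ k ∈ ks, f.contains k = true) →
    pvLe f (ks.foldl (fun f x =>
      f.insert x ((g.getD x []).foldl (fun s p => PySem.Set.update s (pvContribB f p))
        (f.getD x []))) f) := by
  intro ks
  induction ks with
  | nil => intro f _; exact pvLe_refl f
  | cons x ks ih =>
    intro f hk
    simp only [List.foldl_cons]
    have hx : f.contains x = true := hk x List.mem_cons_self
    have h1 : pvLe f (f.insert x ((g.getD x []).foldl
        (fun s p => PySem.Set.update s (pvContribB f p)) (f.getD x []))) :=
      pv_insert_le f x _ hx (pv_foldl_update_prefix _ _ _)
    exact pvLe_trans h1 (ih _ (fun k hkk => (h1.2 k).symm ▸ hk k (List.mem_cons_of_mem x hkk)))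

theorem pv_step_mem (g : PySem.Dict String (List String)) :
    ∀ (ks : List String) (f : PySem.Dict String (PySem.Set String)),
    ks.Nodup → (∀ k ∈ ks, f.contains k = true) →
    ∀ x ∈ ks, ∀ p ∈ g.getD x [], ∀ t ∈ pvContribB f p,
    t ∈ (ks.foldl (fun f x =>
      f.insert x ((g.getD x []).foldl (fun s p => PySem.Set.update s (pvContribB f p))
        (f.getD x []))) f).getD x [] := by
  intro ks
  induction ks with
  | nil => intro f _ _ x hx; simp at hx
  | cons k ks ih =>
    intro f hnd hk x hx p hp t ht
    simp only [List.foldl_cons]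
    have hck : f.contains k = true := hk k List.mem_cons_self
    set v := (g.getD k []).foldl (fun s p => PySem.Set.update s (pvContribB f p)) (f.getD k [])
      with hv
    have h1 : pvLe f (f.insert k v) := pv_insert_le f k v hck (pv_foldl_update_prefix _ _ _)
    have h2 : pvLe (f.insert k v)
        (ks.foldl (fun f x =>
          f.insert x ((g.getD x []).foldl (fun s p => PySem.Set.update s (pvContribB f p))
            (f.getD x []))) (f.insert k v)) :=
      pv_step_fold_le g ks (f.insert k v)
        (fun j hj => (h1.2 j).symm ▸ hk j (List.mem_cons_of_mem k hj))
    rcases List.mem_cons.mp hx with h | h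
    · subst h
      have htv : t ∈ v := pv_mem_foldl_update _ _ hp ht _
      have : t ∈ (f.insert x v).getD x [] := by
        rw [PySem.Dict.getD_insert_self]; exact htv
      exact (h2.1 x).subset this
    · exact ih (f.insert k v) hnd.of_cons
        (fun j hj => (h1.2 j).symm ▸ hk j (List.mem_cons_of_mem k hj)) x h p hp t
        (pv_contrib_mono h1 p t ht)

-- every element a contribution can add is justified
theorem pv_contrib_good {g : PySem.Dict String (List String)}
    {f : PySem.Dict String (PySem.Set String)} (hgood : pvGood g f) {x p t : String}
    (hx : x ∈ g.keys) (hp : p ∈ g.getD x []) (ht : t ∈ pvContribB f p) :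
    t ∈ pvAllLasts g ∧ pvSound g x t := by
  unfold pvContribB at ht
  cases hl : pvLastB p with
  | none => rw [hl] at ht; simp [PySem.Set.empty] at ht
  | some a =>
    rw [hl] at ht; dsimp only at ht
    by_cases hc : f.contains a = true
    · rw [if_pos hc] at ht
      have hgc : g.contains a = true := (pv_contains_eq hgood.1 a) ▸ hc
      have hedge : pvEdge g x a := (pv_mem_succs g x a).mpr ⟨p, hp, hl, hgc⟩
      have := (hgood.2 a).2 t ht
      exact ⟨this.1, pv_sound_head hedge this.2⟩
    · rw [if_neg hc] at ht
      have hta : t = a := by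
        have he : PySem.Set.ofList [a] = [a] := PySem.Set.ofList_eq_self_of_nodup [a] (by simp)
        rw [he] at ht; simpa using ht
      subst hta
      have hgc : g.contains t = false := by
        rw [← pv_contains_eq hgood.1 t]; exact Bool.eq_false_iff.mpr hc
      refine ⟨pv_mem_allLasts g hx hp (pvLast_eq p ▸ hl), ⟨x, Relation.ReflTransGen.refl, ?_⟩⟩
      exact (pv_mem_terms g x t).mpr ⟨p, hp, hl, hgc⟩

theorem pv_good_fold (g : PySem.Dict String (List String)) :
    ∀ (ks : List String), (∀ k ∈ ks, k ∈ g.keys) →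
    ∀ f, pvGood g f → pvGood g (ks.foldl (fun f x =>
      f.insert x ((g.getD x []).foldl (fun s p => PySem.Set.update s (pvContribB f p))
        (f.getD x []))) f) := by
  intro ks
  induction ks with
  | nil => intro _ f h; exact h
  | cons x ks ih =>
    intro hks f hgood
    simp only [List.foldl_cons]
    have hx : x ∈ g.keys := hks x List.mem_cons_self
    have hcx : f.contains x = true := (PySem.Dict.contains_iff_mem_keys f x).mpr (hgood.1 ▸ hx)
    set v := (g.getD x []).foldl (fun s p => PySem.Set.update s (pvContribB f p)) (f.getD x [])
      with hv
    have hgood' : pvGood g (f.insert x v) := by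
      refine ⟨?_, ?_⟩
      · rw [PySem.Dict.keys_insert_of_contains f v hcx]; exact hgood.1
      · intro y
        by_cases hy : y = x
        · subst hy
          rw [PySem.Dict.getD_insert_self]
          refine ⟨pv_nodup_foldl_update _ _ _ (hgood.2 y).1, fun t ht => ?_⟩
          rcases pv_mem_of_foldl_update _ _ _ t ht with h | ⟨p, hp, hc⟩
          · exact (hgood.2 y).2 t h
          · exact pv_contrib_good hgood hx hp hc
        · rw [PySem.Dict.getD_insert_of_ne f v [] hy]
          exact hgood.2 y
    exact ih (fun k hk => hks k (List.mem_cons_of_mem x hk)) _ hgood'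

theorem pv_good_step {g : PySem.Dict String (List String)}
    {f : PySem.Dict String (PySem.Set String)} (h : pvGood g f) : pvGood g (pvStepB g f) :=
  pv_good_fold g g.keys (fun _ hk => hk) f h

theorem pv_step_keys {g : PySem.Dict String (List String)}
    {f : PySem.Dict String (PySem.Set String)} (hkeys : f.keys = g.keys) :
    (pvStepB g f).keys = g.keys := by
  unfold pvStepB
  rw [PySem.Dict.keys_foldl_insert, hkeys, pv_update_of_subset (fun y hy => hy)]

theorem pv_dict_ext_keys (f f' : PySem.Dict String (PySem.Set String))
    (hk : f.keys = f'.keys) (hnd : f.keys.Nodup)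
    (h : ∀ x ∈ f.keys, f.getD x [] = f'.getD x []) : f = f' := by
  apply PySem.Dict.ext
  rw [PySem.Dict.items_eq_map_keys f hnd [], PySem.Dict.items_eq_map_keys f' (hk ▸ hnd) [], ← hk]
  exact List.map_congr_left (fun k hkk => by rw [h k hkk])

theorem pv_sum_lt (F G : String → Nat) :
    ∀ ks : List String, (∀ x ∈ ks, F x ≤ G x) → (∃ x ∈ ks, F x < G x) →
    (ks.map F).sum < (ks.map G).sum := by
  intro ks
  induction ks with
  | nil => rintro _ ⟨x, hx, _⟩; simp at hx
  | cons k ks ih =>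
    rintro hle ⟨x, hx, hlt⟩
    simp only [List.map_cons, List.sum_cons]
    rcases List.mem_cons.mp hx with h | h
    · subst h
      have ht : (ks.map F).sum ≤ (ks.map G).sum :=
        List.sum_le_sum (fun z hz => hle z (List.mem_cons_of_mem _ hz))
      omega
    · have h1 := hle k List.mem_cons_self
      have h2 := ih (fun z hz => hle z (List.mem_cons_of_mem k hz)) ⟨x, h, hlt⟩
      omega

theorem pv_size_lt {g : PySem.Dict String (List String)}
    {f : PySem.Dict String (PySem.Set String)} (hgood : pvGood g f) (hnd : g.keys.Nodup)
    (hne : pvStepB g f ≠ f) : pvSize g f < pvSize g (pvStepB g f) := by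
  have hle : pvLe f (pvStepB g f) := by
    unfold pvStepB
    exact pv_step_fold_le g g.keys f
      (fun k hk => (PySem.Dict.contains_iff_mem_keys f k).mpr (hgood.1 ▸ hk))
  have hex : ∃ x ∈ g.keys, f.getD x [] ≠ (pvStepB g f).getD x [] := by
    by_contra hall
    push Not at hall
    exact hne (pv_dict_ext_keys (pvStepB g f) f
      ((pv_step_keys hgood.1).trans hgood.1.symm) ((pv_step_keys hgood.1).symm ▸ hnd)
      (fun x hx => (hall x ((pv_step_keys hgood.1) ▸ hx)).symm))
  unfold pvSize
  apply pv_sum_lt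
  · exact fun x _ => (hle.1 x).length_le
  · obtain ⟨x, hx, hne'⟩ := hex
    refine ⟨x, hx, ?_⟩
    have h1 := (hle.1 x).length_le
    rcases Nat.lt_or_ge (f.getD x []).length ((pvStepB g f).getD x []).length with h | h
    · exact h
    · exact absurd ((hle.1 x).eq_of_length (Nat.le_antisymm h1 h)) hne'

theorem pv_len_le_of_nodup_subset (l L : List String) (hnd : l.Nodup)
    (hsub : ∀ t ∈ l, t ∈ L) : l.length ≤ L.length := by
  calc l.length = l.toFinset.card := (List.toFinset_card_of_nodup hnd).symm
    _ ≤ L.toFinset.card := Finset.card_le_card (fun a ha => by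
        rw [List.mem_toFinset] at *; exact hsub a (by simpa using ha))
    _ ≤ L.length := List.toFinset_card_le L

theorem pv_allLasts_le (g : PySem.Dict String (List String)) (hnd : g.keys.Nodup) :
    (pvAllLasts g).length ≤ (g.values.map List.length).sum := by
  unfold pvAllLasts
  rw [List.length_flatMap]
  have h1 : ∀ x ∈ g.keys, ((g.getD x []).filterMap pvLastA).length ≤ (g.getD x []).length :=
    fun x _ => List.length_filterMap_le _ _
  have h2 : (g.values.map List.length).sum
      = (g.keys.map (fun x => (g.getD x []).length)).sum := by
    rw [PySem.Dict.values_eq_map_keys g hnd [], List.map_map]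
    rfl
  rw [h2]
  exact List.sum_le_sum h1

theorem pv_size_le {g : PySem.Dict String (List String)}
    {f : PySem.Dict String (PySem.Set String)} (hgood : pvGood g f) (hnd : g.keys.Nodup) :
    pvSize g f ≤ g.size * (g.values.map List.length).sum := by
  unfold pvSize
  have hbound : ∀ x, (f.getD x []).length ≤ (g.values.map List.length).sum := by
    intro x
    calc (f.getD x []).length ≤ (pvAllLasts g).length :=
          pv_len_le_of_nodup_subset _ _ (hgood.2 x).1 (fun t ht => ((hgood.2 x).2 t ht).1)
      _ ≤ _ := pv_allLasts_le g hnd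
  calc (g.keys.map (fun x => (f.getD x []).length)).sum
      ≤ (g.keys.map (fun x => (f.getD x []).length)).length
          * (g.values.map List.length).sum := by
        have := List.sum_le_card_nsmul (g.keys.map (fun x => (f.getD x []).length))
          ((g.values.map List.length).sum) (by
            intro v hv
            obtain ⟨x, _, hx⟩ := List.mem_map.mp hv
            exact hx ▸ hbound x)
        simpa [smul_eq_mul] using this
    _ = g.size * (g.values.map List.length).sum := by
        simp [PySem.Dict.keys, PySem.Dict.size]

theorem pvLoopA_self (g : PySem.Dict String (List String)) :
    ∀ (n : Nat) (f : PySem.Dict String (PySem.Set String)), pvLoopA g n f f = f := by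
  intro n f
  cases n with
  | zero => rfl
  | succ n => simp [pvLoopA]

theorem pv_loop_fix (g : PySem.Dict String (List String)) (hnd : g.keys.Nodup) :
    ∀ (n : Nat) (f prev : PySem.Dict String (PySem.Set String)),
    pvGood g f → (f = prev → pvPassA g f = f) →
    g.size * (g.values.map List.length).sum + 2 ≤ n + pvSize g f →
    ∃ R, pvLoopA g n f prev = R ∧ pvGood g R ∧ pvStepB g R = R := by
  intro n
  induction n with
  | zero =>
    intro f prev hgood _ hfuel
    have := pv_size_le hgood hnd
    omega
  | succ n ih =>
    intro f prev hgood hstop hfuel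
    have hcont : ∀ k ∈ g.keys, f.contains k = true :=
      fun k hk => (PySem.Dict.contains_iff_mem_keys f k).mpr (hgood.1 ▸ hk)
    have hfnd : f.keys.Nodup := hgood.1 ▸ hnd
    by_cases heq : f = prev
    · refine ⟨f, by simp [pvLoopA, heq], hgood, ?_⟩
      rw [← pv_pass_eq g f hcont hfnd]
      exact hstop heq
    · simp only [pvLoopA, if_neg heq]
      rw [pv_pass_eq g f hcont hfnd]
      by_cases hfix : pvStepB g f = f
      · rw [hfix, pvLoopA_self]
        exact ⟨f, rfl, hgood, hfix⟩
      · have hlt := pv_size_lt hgood hnd hfix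
        exact ih (pvStepB g f) f (pv_good_step hgood)
          (fun h => absurd h hfix) (by omega)

-- the initial dict: one empty set per key
theorem pv_init_aux (ks : List String) :
    ∀ d : PySem.Dict String (PySem.Set String),
    ks.Nodup → (∀ k ∈ ks, d.contains k = false) →
    ks.foldl (fun d k => d.setdefault k PySem.Set.empty) d
      = ks.foldl (fun d x => d.insert x PySem.Set.empty) d := by
  induction ks with
  | nil => intro d _ _; rfl
  | cons x ks ih =>
    intro d hnd hc
    simp only [List.foldl_cons]
    rw [PySem.Dict.setdefault_of_not_contains d _ (hc x (List.mem_cons_self))]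
    apply ih _ hnd.of_cons
    intro k hk
    rw [PySem.Dict.contains_insert]
    have hne : k ≠ x := by
      intro he; subst he; exact (List.nodup_cons.mp hnd).1 hk
    simp [hne, hc k (List.mem_cons_of_mem x hk)]

theorem pv_init_getD (ks : List String) :
    ∀ (d : PySem.Dict String (PySem.Set String)), (∀ y, d.getD y [] = []) →
    ∀ x, (ks.foldl (fun d k => d.insert k PySem.Set.empty) d).getD x [] = [] := by
  induction ks with
  | nil => intro d h x; exact h x
  | cons k ks ih =>
    intro d h x
    simp only [List.foldl_cons]
    refine ih _ (fun y => ?_) x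
    by_cases hy : y = k
    · subst hy; rw [PySem.Dict.getD_insert_self]; rfl
    · rw [PySem.Dict.getD_insert_of_ne d _ [] hy]; exact h y

theorem pv_init_keys (ks : List String) (hnd : ks.Nodup) :
    (ks.foldl (fun d x => d.insert x PySem.Set.empty)
      (PySem.Dict.empty : PySem.Dict String (PySem.Set String))).keys = ks := by
  rw [PySem.Dict.keys_foldl_insert, PySem.Dict.keys_empty]
  have h1 : PySem.Set.update ([] : List String) ks = PySem.Set.ofList ks :=
    PySem.Set.update_empty ks
  rw [h1, PySem.Set.ofList_eq_self_of_nodup ks hnd]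

-- characterization of a Good fixpoint of the pass: membership is exactly pvSound
theorem pv_fix_closed {g : PySem.Dict String (List String)} (hnd : g.keys.Nodup)
    {f : PySem.Dict String (PySem.Set String)} (hgood : pvGood g f)
    (hfix : pvStepB g f = f) :
    ∀ x ∈ g.keys, ∀ p ∈ g.getD x [], ∀ t ∈ pvContribB f p, t ∈ f.getD x [] := by
  intro x hx p hp t ht
  have h := pv_step_mem g g.keys f hnd
    (fun k hk => (PySem.Dict.contains_iff_mem_keys f k).mpr (hgood.1 ▸ hk)) x hx p hp t ht
  have hstep : (pvStepB g f).getD x [] = f.getD x [] := by rw [hfix]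
  rw [← hstep]
  exact h

theorem pv_A_char {g : PySem.Dict String (List String)} (hnd : g.keys.Nodup)
    {f : PySem.Dict String (PySem.Set String)} (hgood : pvGood g f)
    (hfix : pvStepB g f = f) (x t : String) :
    t ∈ f.getD x [] ↔ pvSound g x t := by
  constructor
  · intro ht; exact ((hgood.2 x).2 t ht).2
  · rintro ⟨y, hr, hty⟩
    induction hr using Relation.ReflTransGen.head_induction_on with
    | refl =>
      obtain ⟨p, hp, hl, hc⟩ := (pv_mem_terms g y t).mp hty
      have hy : y ∈ g.keys := pv_mem_keys_of_prod g hp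
      refine pv_fix_closed hnd hgood hfix y hy p hp t ?_
      unfold pvContribB
      rw [hl]
      dsimp only
      rw [pv_contains_eq hgood.1 t, hc]
      simp [PySem.Set.ofList_eq_self_of_nodup [t] (by simp)]
    | head he _ ih =>
      rename_i a c _
      obtain ⟨p, hp, hl, hc⟩ := (pv_mem_succs g a c).mp he
      have ha : a ∈ g.keys := pv_mem_keys_of_prod g hp
      refine pv_fix_closed hnd hgood hfix a ha p hp t ?_
      unfold pvContribB
      rw [hl]
      dsimp only
      rw [pv_contains_eq hgood.1 c, hc]
      simpa using ih

-- ===== DFS (port B) =====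
theorem pv_succs_mem_keys {g : PySem.Dict String (List String)} {y a : String}
    (h : a ∈ pvSuccsB g y) : a ∈ g.keys := by
  obtain ⟨_, _, _, hc⟩ := (pv_mem_succs g y a).mp h
  exact (PySem.Dict.contains_iff_mem_keys g a).mp hc

theorem pv_dfs_sound (g : PySem.Dict String (List String)) :
    ∀ (n : Nat) (stack : List String) (seen : PySem.Set String) (z : String),
    z ∈ pvDfsB g n stack seen → z ∈ seen ∨ ∃ y ∈ stack, pvReach g y z := by
  intro n
  induction n with
  | zero =>
    intro stack seen z hz
    cases stack with
    | nil => exact Or.inl hz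
    | cons y rest => exact Or.inl hz
  | succ n ih =>
    intro stack seen z hz
    cases stack with
    | nil => exact Or.inl hz
    | cons y rest =>
      simp only [pvDfsB] at hz
      by_cases hy : PySem.Set.contains seen y = true
      · rw [if_pos hy] at hz
        rcases ih rest seen z hz with h | ⟨w, hw, hr⟩
        · exact Or.inl h
        · exact Or.inr ⟨w, List.mem_cons_of_mem y hw, hr⟩
      · rw [if_neg hy] at hz
        rcases ih _ _ z hz with h | ⟨w, hw, hr⟩
        · rcases (PySem.Set.mem_add seen y z).mp h with h | h
          · exact Or.inl h
          · exact Or.inr ⟨y, List.mem_cons_self, h ▸ Relation.ReflTransGen.refl⟩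
        · rcases List.mem_append.mp hw with h | h
          · exact Or.inr ⟨y, List.mem_cons_self, Relation.ReflTransGen.head h hr⟩
          · exact Or.inr ⟨w, List.mem_cons_of_mem y h, hr⟩

-- potential: stack size plus the out-degrees of the unvisited keys
def pvPhi (g : PySem.Dict String (List String)) (stack : List String)
    (seen : PySem.Set String) : Nat :=
  stack.length + ((g.keys.filter (fun y => !(PySem.Set.contains seen y))).map
    (fun y => (pvSuccsB g y).length)).sum

theorem pv_filter_sum_split (F : String → Nat) (q q' : String → Bool) (y : String)
    (hy : q y = true) (hy' : q' y = false) (hagree : ∀ z, z ≠ y → q z = q' z) :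
    ∀ l : List String, l.Nodup → y ∈ l →
    ((l.filter q).map F).sum = F y + ((l.filter q').map F).sum := by
  intro l
  induction l with
  | nil => intro _ h; simp at h
  | cons k ks ih =>
    intro hnd hmem
    rcases List.mem_cons.mp hmem with h | h
    · subst h
      have hks : ∀ z ∈ ks, q z = q' z :=
        fun z hz => hagree z (fun he => (List.nodup_cons.mp hnd).1 (he ▸ hz))
      have hfilter : ks.filter q = ks.filter q' := List.filter_congr (fun z hz => hks z hz)
      simp [hy, hy', hfilter]
    · have hky : k ≠ y := fun he => (List.nodup_cons.mp hnd).1 (he ▸ h)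
      have h1 := ih (List.nodup_cons.mp hnd).2 h
      by_cases hk : q k = true
      · have hk2 : q' k = true := by rw [← hagree k hky]; exact hk
        simp only [List.filter_cons, hk, hk2, if_true, List.map_cons, List.sum_cons]
        omega
      · have hk1 : q k = false := Bool.eq_false_iff.mpr hk
        have hk2 : q' k = false := by rw [← hagree k hky]; exact hk1
        simp only [List.filter_cons, hk1, hk2, if_false, Bool.false_eq_true]
        exact h1

theorem pv_phi_step {g : PySem.Dict String (List String)} (hnd : g.keys.Nodup)
    {y : String} (hy : y ∈ g.keys) {seen : PySem.Set String}
    (hns : PySem.Set.contains seen y = false) (rest : List String) :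
    pvPhi g (pvSuccsB g y ++ rest) (PySem.Set.add seen y) + 1 = pvPhi g (y :: rest) seen := by
  unfold pvPhi
  have hsplit := pv_filter_sum_split (fun y => (pvSuccsB g y).length)
    (fun z => !(PySem.Set.contains seen z)) (fun z => !(PySem.Set.contains (PySem.Set.add seen y) z))
    y (by dsimp only; rw [hns]; rfl)
    (by
      have hm : y ∈ PySem.Set.add seen y := (PySem.Set.mem_add seen y y).mpr (Or.inr rfl)
      have hcy : PySem.Set.contains (PySem.Set.add seen y) y = true :=
        (PySem.Set.contains_iff _ y).mpr hm
      dsimp only; rw [hcy]; rfl)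
    (by
      intro z hz
      dsimp only
      by_cases hzs : z ∈ seen
      · have c1 : PySem.Set.contains seen z = true := (PySem.Set.contains_iff seen z).mpr hzs
        have c2 : PySem.Set.contains (PySem.Set.add seen y) z = true :=
          (PySem.Set.contains_iff _ z).mpr ((PySem.Set.mem_add seen y z).mpr (Or.inl hzs))
        rw [c1, c2]
      · have c1 : PySem.Set.contains seen z = false := by
          rw [Bool.eq_false_iff]; exact fun hc => hzs ((PySem.Set.contains_iff seen z).mp hc)
        have c2 : PySem.Set.contains (PySem.Set.add seen y) z = false := by
          rw [Bool.eq_false_iff]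
          intro hc
          rcases (PySem.Set.mem_add seen y z).mp ((PySem.Set.contains_iff _ z).mp hc) with h | h
          · exact hzs h
          · exact hz h
        rw [c1, c2])
    g.keys hnd hy
  dsimp only at hsplit
  simp only [List.length_append, List.length_cons]
  omega

theorem pv_dfs_complete (g : PySem.Dict String (List String)) (hnd : g.keys.Nodup) :
    ∀ (n : Nat) (stack : List String) (seen : PySem.Set String),
    (∀ y ∈ stack, y ∈ g.keys) → (∀ y ∈ seen, y ∈ g.keys) →
    (∀ y ∈ seen, ∀ a ∈ pvSuccsB g y, a ∈ seen ∨ a ∈ stack) →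
    pvPhi g stack seen ≤ n →
    (∀ z ∈ seen, z ∈ pvDfsB g n stack seen) ∧
    (∀ z ∈ stack, z ∈ pvDfsB g n stack seen) ∧
    (∀ y ∈ pvDfsB g n stack seen, ∀ a ∈ pvSuccsB g y, a ∈ pvDfsB g n stack seen) := by
  intro n
  induction n with
  | zero =>
    intro stack seen hstk hsn hclosed hphi
    cases stack with
    | nil =>
      refine ⟨fun z hz => hz, by simp, fun y hy a ha => ?_⟩
      rcases hclosed y hy a ha with h | h
      · exact h
      · simp at h
    | cons y rest => unfold pvPhi at hphi; simp at hphi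
  | succ n ih =>
    intro stack seen hstk hsn hclosed hphi
    cases stack with
    | nil =>
      refine ⟨fun z hz => hz, by simp, fun y hy a ha => ?_⟩
      rcases hclosed y hy a ha with h | h
      · exact h
      · simp at h
    | cons y rest =>
      simp only [pvDfsB]
      by_cases hy : PySem.Set.contains seen y = true
      · rw [if_pos hy]
        have hyseen : y ∈ seen := (PySem.Set.contains_iff seen y).mp hy
        have hcl : ∀ w ∈ seen, ∀ a ∈ pvSuccsB g w, a ∈ seen ∨ a ∈ rest := by
          intro w hw a ha
          rcases hclosed w hw a ha with h | h
          · exact Or.inl h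
          · rcases List.mem_cons.mp h with h | h
            · exact Or.inl (h ▸ hyseen)
            · exact Or.inr h
        have hphi' : pvPhi g rest seen ≤ n := by
          unfold pvPhi at hphi ⊢; simp only [List.length_cons] at hphi; omega
        obtain ⟨h1, h2, h3⟩ := ih rest seen
          (fun z hz => hstk z (List.mem_cons_of_mem y hz)) hsn hcl hphi'
        exact ⟨h1, fun z hz => by
          rcases List.mem_cons.mp hz with h | h
          · exact h ▸ h1 y hyseen
          · exact h2 z h, h3⟩
      · rw [if_neg hy]
        have hyns : PySem.Set.contains seen y = false := Bool.eq_false_iff.mpr hy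
        have hyk : y ∈ g.keys := hstk y List.mem_cons_self
        have hstk' : ∀ z ∈ pvSuccsB g y ++ rest, z ∈ g.keys := by
          intro z hz
          rcases List.mem_append.mp hz with h | h
          · exact pv_succs_mem_keys h
          · exact hstk z (List.mem_cons_of_mem y h)
        have hsn' : ∀ z ∈ PySem.Set.add seen y, z ∈ g.keys := by
          intro z hz
          rcases (PySem.Set.mem_add seen y z).mp hz with h | h
          · exact hsn z h
          · exact h ▸ hyk
        have hcl' : ∀ w ∈ PySem.Set.add seen y, ∀ a ∈ pvSuccsB g w,
            a ∈ PySem.Set.add seen y ∨ a ∈ pvSuccsB g y ++ rest := by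
          intro w hw a ha
          rcases (PySem.Set.mem_add seen y w).mp hw with h | h
          · rcases hclosed w h a ha with h' | h'
            · exact Or.inl ((PySem.Set.mem_add seen y a).mpr (Or.inl h'))
            · rcases List.mem_cons.mp h' with h'' | h''
              · exact Or.inl ((PySem.Set.mem_add seen y a).mpr (Or.inr h''))
              · exact Or.inr (List.mem_append.mpr (Or.inr h''))
          · subst h
            exact Or.inr (List.mem_append.mpr (Or.inl ha))
        have hphi' : pvPhi g (pvSuccsB g y ++ rest) (PySem.Set.add seen y) ≤ n := by
          have := pv_phi_step hnd hyk hyns rest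
          omega
        obtain ⟨h1, h2, h3⟩ := ih (pvSuccsB g y ++ rest) (PySem.Set.add seen y) hstk' hsn' hcl' hphi'
        refine ⟨fun z hz => h1 z ((PySem.Set.mem_add seen y z).mpr (Or.inl hz)), ?_, h3⟩
        intro z hz
        rcases List.mem_cons.mp hz with h | h
        · exact h ▸ h1 y ((PySem.Set.mem_add seen y y).mpr (Or.inr rfl))
        · exact h2 z (List.mem_append.mpr (Or.inr h))

theorem pv_dfs_char (g : PySem.Dict String (List String)) (hnd : g.keys.Nodup)
    {x : String} (hx : x ∈ g.keys) (z : String) :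
    z ∈ pvDfsB g (1 + (g.values.map List.length).sum) [x] PySem.Set.empty ↔ pvReach g x z := by
  constructor
  · intro hz
    rcases pv_dfs_sound g _ _ _ z hz with h | ⟨y, hy, hr⟩
    · simp [PySem.Set.empty] at h
    · have : y = x := List.mem_singleton.mp hy
      exact this ▸ hr
  · intro hr
    have hphi : pvPhi g [x] PySem.Set.empty ≤ 1 + (g.values.map List.length).sum := by
      unfold pvPhi
      have hfilter : g.keys.filter (fun y => !(PySem.Set.contains PySem.Set.empty y)) = g.keys :=
        List.filter_eq_self.mpr (fun a _ => rfl)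
      rw [hfilter]
      have h2 : (g.keys.map (fun yk => (pvSuccsB g yk).length)).sum
          ≤ (g.keys.map (fun yk => (g.getD yk []).length)).sum :=
        List.sum_le_sum (fun yk _ => List.length_filterMap_le _ _)
      have h3 : (g.values.map List.length).sum
          = (g.keys.map (fun yk => (g.getD yk []).length)).sum := by
        rw [PySem.Dict.values_eq_map_keys g hnd [], List.map_map]; rfl
      simp only [List.length_cons, List.length_nil]
      omega
    obtain ⟨h1, h2, h3⟩ := pv_dfs_complete g hnd (1 + (g.values.map List.length).sum)
      [x] PySem.Set.empty
      (fun y hy => (List.mem_singleton.mp hy) ▸ hx)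
      (by simp [PySem.Set.empty]) (by simp [PySem.Set.empty]) hphi
    induction hr with
    | refl => exact h2 x List.mem_cons_self
    | tail _ he ih => exact h3 _ ih _ he

theorem pv_valB_mem (g : PySem.Dict String (List String)) (l : List String) (t : String) :
    ∀ s : PySem.Set String,
    t ∈ l.foldl (fun s y => PySem.Set.update s (pvTermsB g y)) s ↔
      (t ∈ s ∨ ∃ y ∈ l, t ∈ pvTermsB g y) := by
  induction l with
  | nil => intro s; simp
  | cons y l ih =>
    intro s
    simp only [List.foldl_cons]
    rw [ih]
    constructor
    · rintro (h | ⟨w, hw, hwt⟩)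
      · rcases (PySem.Set.mem_update s (pvTermsB g y) t).mp h with h | h
        · exact Or.inl h
        · exact Or.inr ⟨y, List.mem_cons_self, h⟩
      · exact Or.inr ⟨w, List.mem_cons_of_mem y hw, hwt⟩
    · rintro (h | ⟨w, hw, hwt⟩)
      · exact Or.inl ((PySem.Set.mem_update s (pvTermsB g y) t).mpr (Or.inl h))
      · rcases List.mem_cons.mp hw with h | h
        · exact Or.inl ((PySem.Set.mem_update s (pvTermsB g y) t).mpr (Or.inr (h ▸ hwt)))
        · exact Or.inr ⟨w, h, hwt⟩

theorem pv_valB_nodup (g : PySem.Dict String (List String)) (l : List String) :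
    ∀ s : PySem.Set String, s.Nodup →
    (l.foldl (fun s y => PySem.Set.update s (pvTermsB g y)) s).Nodup := by
  induction l with
  | nil => intro s hs; exact hs
  | cons y l ih =>
    intro s hs
    simp only [List.foldl_cons]
    exact ih _ (PySem.Set.nodup_update s (pvTermsB g y) hs)

-- ===== VERDICT (by name: the statement is the Claim_ definition above) =====
theorem first_sets_spec : Claim_equal_first_sets := by
  intro grammar _ _
  show first_sets grammar = first_sets_alt grammar
  simp only [first_sets, first_sets_alt]
  set g := PySem.Dict.ofList grammar with hg
  have hgnd : g.keys.Nodup := PySem.Dict.nodup_keys_ofList grammar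
  rw [pv_init_aux g.keys PySem.Dict.empty hgnd (fun k _ => PySem.Dict.contains_empty k)]
  set init := g.keys.foldl (fun d x => d.insert x PySem.Set.empty) PySem.Dict.empty with hinit
  have hinitkeys : init.keys = g.keys := pv_init_keys g.keys hgnd
  have hinitgetD : ∀ x, init.getD x [] = [] :=
    pv_init_getD g.keys PySem.Dict.empty (fun y => PySem.Dict.getD_empty y []) 
  have hgoodinit : pvGood g init :=
    ⟨hinitkeys, fun x => by rw [hinitgetD x]; exact ⟨List.nodup_nil, by simp⟩⟩
  have hstop : init = PySem.Dict.empty → pvPassA g init = init := by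
    intro he
    have h0 : g.keys = [] := by rw [← hinitkeys, he, PySem.Dict.keys_empty]
    unfold pvPassA
    rw [h0]
    rfl
  obtain ⟨R, hloop, hgoodR, hfixR⟩ := pv_loop_fix g hgnd
    (g.size * (g.values.map List.length).sum + 2) init PySem.Dict.empty hgoodinit hstop
    (by omega)
  rw [hloop]
  -- B's dict is a fold over fresh distinct keys: its items list is explicit
  have hDitems := PySem.Dict.items_foldl_insert_fresh (l := g.keys) (k := fun a => a)
    (v := fun x => (pvDfsB g (1 + (g.values.map List.length).sum) [x]
      PySem.Set.empty).foldl (fun s y => PySem.Set.update s (pvTermsB g y)) PySem.Set.empty)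
    (d := PySem.Dict.empty)
    (fun a _ => PySem.Dict.contains_empty a) (by simpa using hgnd)
  have hRitems : R.items = g.keys.map (fun k => (k, R.getD k [])) := by
    rw [PySem.Dict.items_eq_map_keys R (hgoodR.1 ▸ hgnd) [], hgoodR.1]
  rw [hRitems, hDitems]
  have hemp : (PySem.Dict.empty : PySem.Dict String (PySem.Set String)).items = [] := rfl
  rw [hemp, List.nil_append, List.map_map, List.map_map]
  apply List.map_congr_left
  intro k hk
  simp only [Function.comp]
  refine congrArg (fun v => (k, v)) ?_
  unfold pvCanon
  apply PySem.List.sorted_eq_sorted_of_perm _ _ _ (fun a b h => h)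
  apply (List.perm_ext_iff_of_nodup (hgoodR.2 k).1
    (pv_valB_nodup g _ PySem.Set.empty List.nodup_nil)).mpr
  intro t
  rw [pv_A_char hgnd hgoodR hfixR k t, pv_valB_mem g _ t PySem.Set.empty]
  constructor
  · rintro ⟨y, hr, hty⟩
    exact Or.inr ⟨y, (pv_dfs_char g hgnd hk y).mpr hr, hty⟩
  · rintro (h | ⟨y, hy, hty⟩)
    · simp [PySem.Set.empty] at h
    · exact ⟨y, (pv_dfs_char g hgnd hk y).mp hy, hty⟩
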